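-- pv_equiv track=rewrite | github.com/Dolman17/PayScope | backfill_other_sectors_from_roles.py | _infer_from_role
-- ===== SOURCE A (Python) =====
-- SECTOR_SOCIAL_CARE = "Social Care"
--
-- SECTOR_HR = "HR / People"
--
-- SECTOR_IT = "IT & Technology"
--
-- SECTOR_FINANCE = "Finance & Accounting"
--
-- SECTOR_ADMIN = "Admin & Office"
--
-- SECTOR_CUSTOMER = "Customer Service"
--
-- SECTOR_SALES = "Sales & Marketing"
--
-- SECTOR_EDU = "Education & Training"
--
-- SECTOR_LEGAL = "Legal"
--
-- SECTOR_OPS_LOGISTICS = "Operations & Logistics"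
--
-- def _infer_from_role(role_text: str) -> str | None:
--     """
--     Second-pass inference for anything still sitting in 'Other'/blank.
--     Target the stubborn leftovers: ops/logistics, IT/product, legal, HR variants, social worker, etc.
--     """
--     t = role_text.lower()
--
--     # --- Social care (social worker variants) ---
--     if "social worker" in t:
--         return SECTOR_SOCIAL_CARE
--
--     # --- Operations & Logistics ---
--     ops_words = [
--         "warehouse", "operative", "driver", "7.5t", "c1", "hgv", "courier", "delivery",
--         "logistics", "transport", "fleet", "stores", "stock", "picker", "picking",
--         "pack", "packing", "dispatch", "forklift", "flt",
--         "front of house", "front-of-house", "foh",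
--         "brand ambassador", "events", "venue", "steward",
--         "facilities", "estates", "caretaker", "grounds", "gardener",
--     ]
--     if any(w in t for w in ops_words):
--         return SECTOR_OPS_LOGISTICS
--
--     # --- IT & Product ---
--     it_words = [
--         ".net", "dotnet", "developer", "software", "engineer", "devops",
--         "infrastructure", "sysadmin", "cloud", "data engineer",
--         "product owner", "product analyst", "business analyst",
--     ]
--     if any(w in t for w in it_words):
--         return SECTOR_IT
--
--     # --- Legal ---
--     legal_words = [
--         "solicitor", "litigation", "in-house counsel", "counsel",
--         "intellectual property", "ip ", "paralegal", "legal",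
--     ]
--     if any(w in t for w in legal_words):
--         return SECTOR_LEGAL
--
--     # --- HR / People (reward variants + HR) ---
--     hr_words = [
--         "hr ", "human resources", "people partner", "people advisor",
--         "talent", "rewards", "total rewards", "compensation", "benefits", "payroll",
--     ]
--     if any(w in t for w in hr_words):
--         return SECTOR_HR
--
--     # --- Finance ---
--     fin_words = ["finance", "accountant", "accounting", "financial", "fp&a", "bank reconciliation"]
--     if any(w in t for w in fin_words):
--         return SECTOR_FINANCE
--
--     # --- Admin ---
--     admin_words = ["administrator", "admin ", "receptionist", "personal assistant", "executive assistant", "data entry"]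
--     if any(w in t for w in admin_words):
--         return SECTOR_ADMIN
--
--     # --- Customer service ---
--     cust_words = ["customer service", "call centre", "contact centre"]
--     if any(w in t for w in cust_words):
--         return SECTOR_CUSTOMER
--
--     # --- Sales & Marketing ---
--     sales_words = ["sales", "business development", "account director", "account handler", "marketing"]
--     if any(w in t for w in sales_words):
--         return SECTOR_SALES
--
--     # --- Education ---
--     edu_words = ["trainer", "tutor", "lecturer", "teacher", "education", "learning"]
--     if any(w in t for w in edu_words):
--         return SECTOR_EDU
--
--     return None
-- ===== SOURCE B (Python) =====
-- SECTOR_SOCIAL_CARE = "Social Care"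
-- SECTOR_HR = "HR / People"
-- SECTOR_IT = "IT & Technology"
-- SECTOR_FINANCE = "Finance & Accounting"
-- SECTOR_ADMIN = "Admin & Office"
-- SECTOR_CUSTOMER = "Customer Service"
-- SECTOR_SALES = "Sales & Marketing"
-- SECTOR_EDU = "Education & Training"
-- SECTOR_LEGAL = "Legal"
-- SECTOR_OPS_LOGISTICS = "Operations & Logistics"
--
-- def _tag(sector, prio, kws):
--     return [(kw, prio, sector) for kw in kws]
--
-- # One flat keyword index (keyword, priority, sector), priorities matching the
-- # original branch order; the classifier is a single min-priority scan over it.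
-- _KEYWORD_INDEX = (
--     _tag(SECTOR_SOCIAL_CARE, 0, ["social worker"])
--     + _tag(SECTOR_OPS_LOGISTICS, 1, [
--         "warehouse", "operative", "driver", "7.5t", "c1", "hgv", "courier", "delivery",
--         "logistics", "transport", "fleet", "stores", "stock", "picker", "picking",
--         "pack", "packing", "dispatch", "forklift", "flt",
--         "front of house", "front-of-house", "foh",
--         "brand ambassador", "events", "venue", "steward",
--         "facilities", "estates", "caretaker", "grounds", "gardener",
--     ])
--     + _tag(SECTOR_IT, 2, [
--         ".net", "dotnet", "developer", "software", "engineer", "devops",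
--         "infrastructure", "sysadmin", "cloud", "data engineer",
--         "product owner", "product analyst", "business analyst",
--     ])
--     + _tag(SECTOR_LEGAL, 3, [
--         "solicitor", "litigation", "in-house counsel", "counsel",
--         "intellectual property", "ip ", "paralegal", "legal",
--     ])
--     + _tag(SECTOR_HR, 4, [
--         "hr ", "human resources", "people partner", "people advisor",
--         "talent", "rewards", "total rewards", "compensation", "benefits", "payroll",
--     ])
--     + _tag(SECTOR_FINANCE, 5, ["finance", "accountant", "accounting", "financial", "fp&a", "bank reconciliation"])
--     + _tag(SECTOR_ADMIN, 6, ["administrator", "admin ", "receptionist", "personal assistant", "executive assistant", "data entry"])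
--     + _tag(SECTOR_CUSTOMER, 7, ["customer service", "call centre", "contact centre"])
--     + _tag(SECTOR_SALES, 8, ["sales", "business development", "account director", "account handler", "marketing"])
--     + _tag(SECTOR_EDU, 9, ["trainer", "tutor", "lecturer", "teacher", "education", "learning"])
-- )
--
-- def _infer_from_role(role_text: str) -> str | None:
--     # One pass over the flat index, keeping the best (lowest-priority) hit seen.
--     t = role_text.lower()
--     best = None
--     for kw, prio, sector in _KEYWORD_INDEX:
--         if kw in t and (best is None or prio < best[0]):
--             best = (prio, sector)
--     return best[1] if best is not None else None
-- ===== Notes on version B (the rewrite author's own statement) =====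
-- stated objective: alternative
-- what changed: Replaces the ten sequential early-return branch blocks with one flat (keyword, priority, sector) index scanned in a single pass that keeps the minimum-priority hit; the priority minimum reproduces the original branch order.
import Mathlib
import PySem

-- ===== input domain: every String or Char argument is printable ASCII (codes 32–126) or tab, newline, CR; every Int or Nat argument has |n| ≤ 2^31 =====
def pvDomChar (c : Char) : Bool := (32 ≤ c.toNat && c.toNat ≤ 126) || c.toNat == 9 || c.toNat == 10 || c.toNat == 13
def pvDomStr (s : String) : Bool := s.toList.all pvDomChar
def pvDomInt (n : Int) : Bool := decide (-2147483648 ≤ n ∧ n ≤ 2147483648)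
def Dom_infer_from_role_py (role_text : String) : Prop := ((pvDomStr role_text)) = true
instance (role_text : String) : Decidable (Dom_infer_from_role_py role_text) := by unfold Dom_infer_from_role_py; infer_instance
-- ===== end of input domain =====

-- B replaces the ten sequential early-return branch blocks with one flat (keyword, priority,
-- sector) index scanned in a single pass that keeps the minimum-priority hit (objective: alternative).


-- shared keyword constants (same-module constants in both Pythons)
def opsW : List String :=
  ["warehouse", "operative", "driver", "7.5t", "c1", "hgv", "courier", "delivery",
   "logistics", "transport", "fleet", "stores", "stock", "picker", "picking",
   "pack", "packing", "dispatch", "forklift", "flt",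
   "front of house", "front-of-house", "foh",
   "brand ambassador", "events", "venue", "steward",
   "facilities", "estates", "caretaker", "grounds", "gardener"]
def itW : List String :=
  [".net", "dotnet", "developer", "software", "engineer", "devops",
   "infrastructure", "sysadmin", "cloud", "data engineer",
   "product owner", "product analyst", "business analyst"]
def legalW : List String :=
  ["solicitor", "litigation", "in-house counsel", "counsel",
   "intellectual property", "ip ", "paralegal", "legal"]
def hrW : List String :=
  ["hr ", "human resources", "people partner", "people advisor",
   "talent", "rewards", "total rewards", "compensation", "benefits", "payroll"]
def finW : List String :=
  ["finance", "accountant", "accounting", "financial", "fp&a", "bank reconciliation"]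
def adminW : List String :=
  ["administrator", "admin ", "receptionist", "personal assistant", "executive assistant", "data entry"]
def custW : List String := ["customer service", "call centre", "contact centre"]
def salesW : List String :=
  ["sales", "business development", "account director", "account handler", "marketing"]
def eduW : List String := ["trainer", "tutor", "lecturer", "teacher", "education", "learning"]

-- ===== PORT A =====
-- literal transliteration of _infer_from_role: lowercase once, then ten branch blocks in order
def infer_from_role_py (role_text : String) : Option String :=
  let t := PySem.Str.lower role_text
  if PySem.Str.isIn "social worker" t then some "Social Care"
  else if opsW.any (fun w => PySem.Str.isIn w t) then some "Operations & Logistics"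
  else if itW.any (fun w => PySem.Str.isIn w t) then some "IT & Technology"
  else if legalW.any (fun w => PySem.Str.isIn w t) then some "Legal"
  else if hrW.any (fun w => PySem.Str.isIn w t) then some "HR / People"
  else if finW.any (fun w => PySem.Str.isIn w t) then some "Finance & Accounting"
  else if adminW.any (fun w => PySem.Str.isIn w t) then some "Admin & Office"
  else if custW.any (fun w => PySem.Str.isIn w t) then some "Customer Service"
  else if salesW.any (fun w => PySem.Str.isIn w t) then some "Sales & Marketing"
  else if eduW.any (fun w => PySem.Str.isIn w t) then some "Education & Training"
  else none

-- ===== PORT B =====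
-- _tag of Source B
def tagKw (sector : String) (prio : Nat) (kws : List String) : List (String × Nat × String) :=
  kws.map (fun kw => (kw, prio, sector))

-- _KEYWORD_INDEX of Source B: the flat keyword index
def kwIndex : List (String × Nat × String) :=
  tagKw "Social Care" 0 ["social worker"]
  ++ tagKw "Operations & Logistics" 1 opsW
  ++ tagKw "IT & Technology" 2 itW
  ++ tagKw "Legal" 3 legalW
  ++ tagKw "HR / People" 4 hrW
  ++ tagKw "Finance & Accounting" 5 finW
  ++ tagKw "Admin & Office" 6 adminW
  ++ tagKw "Customer Service" 7 custW
  ++ tagKw "Sales & Marketing" 8 salesW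
  ++ tagKw "Education & Training" 9 eduW

-- the loop body of Source B: keep the best (lowest-priority) hit seen so far
def bStep (t : String) (best : Option (Nat × String)) (r : String × Nat × String) :
    Option (Nat × String) :=
  if PySem.Str.isIn r.1 t && (match best with | none => true | some b => decide (r.2.1 < b.1))
  then some r.2 else best

def infer_from_role_py_alt (role_text : String) : Option String :=
  let t := PySem.Str.lower role_text
  (kwIndex.foldl (bStep t) none).map (fun b => b.2)

-- ===== PRECONDITION & SPEC =====
def Spec_infer_from_role_py (role_text : String) (out : Option String) : Prop := out = infer_from_role_py_alt role_text
instance (role_text : String) (out : Option String) : Decidable (Spec_infer_from_role_py role_text out) := by unfold Spec_infer_from_role_py; infer_instance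

-- ===== CLAIM (what is proved, stated in full; the proofs are below) =====
def Claim_equal_infer_from_role_py : Prop := ∀ (role_text : String), Dom_infer_from_role_py role_text → Spec_infer_from_role_py role_text (infer_from_role_py role_text)

-- ===== LEMMAS AND PROOFS =====

-- once a hit of priority b ≤ i is held, a whole group tagged with priority i changes nothing
theorem foldl_tag_skip (t : String) (kws : List String) (s : String) (i b : Nat) (sb : String)
    (h : b ≤ i) :
    List.foldl (bStep t) (some (b, sb)) (tagKw s i kws) = some (b, sb) := by
  induction kws with
  | nil => rfl
  | cons w ws ih =>
    have hlt : ¬ i < b := by omega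
    simpa [tagKw, bStep, hlt] using ih

-- from an empty accumulator, a group tagged i yields its own hit iff any keyword matches
theorem foldl_tag_none (t : String) (kws : List String) (s : String) (i : Nat) :
    List.foldl (bStep t) none (tagKw s i kws)
      = if kws.any (fun w => PySem.Str.isIn w t) then some (i, s) else none := by
  induction kws with
  | nil => rfl
  | cons w ws ih =>
    simp only [tagKw, List.map_cons, List.foldl_cons, List.any_cons] at ih ⊢
    by_cases hw : PySem.Chars.isIn w.toList t.toList = true
    · rw [show bStep t none (w, i, s) = some (i, s) from by simp [bStep, hw]]
      have hskip := foldl_tag_skip t ws s i i s (le_refl i)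
      simp only [tagKw] at hskip
      rw [hskip]
      simp [hw]
    · have hw' : PySem.Chars.isIn w.toList t.toList = false := by simpa using hw
      rw [show bStep t none (w, i, s) = none from by simp [bStep, hw']]
      rw [ih]
      simp [hw']

-- ===== VERDICT (by name: the statement is the Claim_ definition above) =====
theorem infer_from_role_py_spec : Claim_equal_infer_from_role_py := by
  intro role_text _
  unfold Spec_infer_from_role_py infer_from_role_py infer_from_role_py_alt kwIndex
  generalize PySem.Str.lower role_text = t
  simp only [List.foldl_append, foldl_tag_none, List.any_cons, List.any_nil, Bool.or_false]
  generalize PySem.Str.isIn "social worker" t = c0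
  cases c0 with
  | true => simp [foldl_tag_skip]
  | false =>
  simp only [Bool.false_eq_true, if_false, foldl_tag_none]
  generalize (opsW.any fun w => PySem.Str.isIn w t) = c1
  cases c1 with
  | true => simp [foldl_tag_skip]
  | false =>
  simp only [Bool.false_eq_true, if_false, foldl_tag_none]
  generalize (itW.any fun w => PySem.Str.isIn w t) = c2
  cases c2 with
  | true => simp [foldl_tag_skip]
  | false =>
  simp only [Bool.false_eq_true, if_false, foldl_tag_none]
  generalize (legalW.any fun w => PySem.Str.isIn w t) = c3
  cases c3 with
  | true => simp [foldl_tag_skip]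
  | false =>
  simp only [Bool.false_eq_true, if_false, foldl_tag_none]
  generalize (hrW.any fun w => PySem.Str.isIn w t) = c4
  cases c4 with
  | true => simp [foldl_tag_skip]
  | false =>
  simp only [Bool.false_eq_true, if_false, foldl_tag_none]
  generalize (finW.any fun w => PySem.Str.isIn w t) = c5
  cases c5 with
  | true => simp [foldl_tag_skip]
  | false =>
  simp only [Bool.false_eq_true, if_false, foldl_tag_none]
  generalize (adminW.any fun w => PySem.Str.isIn w t) = c6
  cases c6 with
  | true => simp [foldl_tag_skip]
  | false =>
  simp only [Bool.false_eq_true, if_false, foldl_tag_none]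
  generalize (custW.any fun w => PySem.Str.isIn w t) = c7
  cases c7 with
  | true => simp [foldl_tag_skip]
  | false =>
  simp only [Bool.false_eq_true, if_false, foldl_tag_none]
  generalize (salesW.any fun w => PySem.Str.isIn w t) = c8
  cases c8 with
  | true => simp [foldl_tag_skip]
  | false =>
  simp only [Bool.false_eq_true, if_false, foldl_tag_none]
  generalize (eduW.any fun w => PySem.Str.isIn w t) = c9
  cases c9 with
  | true => simp
  | false =>
  simp
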